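-- pv_equiv track=rewrite | github.com/shanemarvinmay/interview-prep | questions/coding/leetcode_2832/maximal_range_that_each_element_is_maximum_in_it.py | maximumLengthOfRanges
-- ===== SOURCE A (Python) =====
-- from typing import List
--
-- def maximumLengthOfRanges(nums: List[int]) -> List[int]:
--     n = len(nums)
--     res = [1] * n # starting at 1 to include the num we are on
--
--     # Adding whats <= val on the left
--     s = [] # monotomic stack (val, idx)
--     for i, val in enumerate(nums):
--         # rm small values from stack
--         while s and s[-1][0] < val:
--             s.pop()
--         # Adding how many <= values on the left
--         if s:
--             res[i] += i - s[-1][1] - 1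
--         else:
--             res[i] += i
--         # Appending current val and index to stack
--         s.append((val, i))
--
--     # Adding whats <= val on the right
--     # Emptying the stack
--     s = [] # monotomic stack (val, idx)
--     for i in range(n-1, -1, -1):
--         val = nums[i]
--         # rm small values from stack
--         while s and s[-1][0] < val:
--             s.pop()
--         # Adding how many <= values on the right
--         if s:
--             res[i] += s[-1][1] - i - 1 # -1 to exclude the num we are on
--         else:
--             res[i] += n - i - 1 # -1 to exclude the num we are on
--         # Appending current val and index to stack
--         s.append((val, i))
--
--     return res
-- ===== SOURCE B (Python) =====
-- from typing import List
--
-- def maximumLengthOfRanges(nums: List[int]) -> List[int]: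
--     n = len(nums)
--     res = []
--     for i in range(n):
--         val = nums[i]
--         count = 1
--         j = i - 1
--         while j >= 0 and nums[j] < val:
--             count += 1
--             j -= 1
--         j = i + 1
--         while j < n and nums[j] < val:
--             count += 1
--             j += 1
--         res.append(count)
--     return res
-- ===== Notes on version B (the rewrite author's own statement) =====
-- stated objective: simpler
-- what changed: Replaced the two monotonic-stack passes updating a preallocated array with a direct per-index expansion: for each i, walk left and right while neighbours are strictly smaller and count them.
import Mathlib
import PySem

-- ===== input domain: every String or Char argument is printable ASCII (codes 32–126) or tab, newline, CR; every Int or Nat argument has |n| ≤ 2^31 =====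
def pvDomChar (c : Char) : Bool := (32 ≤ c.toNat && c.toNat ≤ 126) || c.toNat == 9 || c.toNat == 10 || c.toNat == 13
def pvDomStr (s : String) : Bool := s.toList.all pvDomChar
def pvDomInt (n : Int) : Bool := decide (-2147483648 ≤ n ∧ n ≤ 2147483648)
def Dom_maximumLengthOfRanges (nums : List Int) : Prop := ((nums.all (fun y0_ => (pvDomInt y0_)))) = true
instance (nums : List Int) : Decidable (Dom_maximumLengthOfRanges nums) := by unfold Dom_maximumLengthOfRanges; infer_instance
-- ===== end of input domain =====

-- B replaces A's two monotonic-stack passes by a plain per-index expansion (walk left/right while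
-- strictly smaller); simpler and shorter, not faster.

-- ===== PORT A =====

-- the inner `while s and s[-1][0] < val: s.pop()` loop (stack top at the head)
def popS (val : Int) : List (Int × Nat) → List (Int × Nat)
  | [] => []
  | (v, j) :: rest => if v < val then popS val rest else (v, j) :: rest

-- first pass: `for i, val in enumerate(nums)` with state (stack s, res)
def lpass : Nat → List Int → List (Int × Nat) → List Int → List Int
  | _, [], _, res => res
  | i, val :: rest, s, res =>
    let s' := popS val s
    let add : Int :=
      match s'.head? with
      | some (_, j) => (i : Int) - (j : Int) - 1   -- res[i] += i - s[-1][1] - 1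
      | none => (i : Int)                           -- res[i] += i
    lpass (i + 1) rest ((val, i) :: s') (res.set i (res.getD i 0 + add))

-- second pass: `for i in range(n-1, -1, -1)`; the counter k processes index k-1 and descends
def rpass (nums : List Int) (n : Nat) : Nat → List (Int × Nat) → List Int → List Int
  | 0, _, res => res
  | k + 1, s, res =>
    let val := nums.getD k 0
    let s' := popS val s
    let add : Int :=
      match s'.head? with
      | some (_, j) => (j : Int) - (k : Int) - 1   -- res[i] += s[-1][1] - i - 1
      | none => (n : Int) - (k : Int) - 1          -- res[i] += n - i - 1
    rpass nums n k ((val, k) :: s') (res.set k (res.getD k 0 + add))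

def maximumLengthOfRanges (nums : List Int) : List Int :=
  let n := nums.length
  let res := List.replicate n (1 : Int)
  let res1 := lpass 0 nums [] res
  rpass nums n n [] res1

-- ===== PORT B =====

-- `j = i-1; while j >= 0 and nums[j] < val: count += 1; j -= 1` (argument is j+1)
def cntL (nums : List Int) (val : Int) : Nat → Int
  | 0 => 0
  | j + 1 => if nums.getD j 0 < val then cntL nums val j + 1 else 0

-- `j = i+1; while j < n and nums[j] < val: count += 1; j += 1` over the remaining suffix
def cntR (val : Int) : List Int → Int
  | [] => 0
  | x :: rest => if x < val then cntR val rest + 1 else 0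

def maximumLengthOfRanges_alt (nums : List Int) : List Int :=
  (List.range nums.length).map (fun i =>
    let val := nums.getD i 0
    1 + cntL nums val i + cntR val (nums.drop (i + 1)))

-- ===== PRECONDITION & SPEC =====
def Spec_maximumLengthOfRanges (nums : List Int) (out : List Int) : Prop := out = maximumLengthOfRanges_alt nums
instance (nums : List Int) (out : List Int) : Decidable (Spec_maximumLengthOfRanges nums out) := by unfold Spec_maximumLengthOfRanges; infer_instance

-- ===== CLAIM (what is proved, stated in full; the proofs are below) =====
def Claim_equal_maximumLengthOfRanges : Prop := ∀ (nums : List Int), Dom_maximumLengthOfRanges nums → Spec_maximumLengthOfRanges nums (maximumLengthOfRanges nums)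

-- ===== LEMMAS AND PROOFS =====

-- the counts B computes, as takeWhile lengths
def lenL (nums : List Int) (i : Nat) (val : Int) : Nat :=
  ((nums.take i).reverse.takeWhile (fun x => x < val)).length

def lenR (nums : List Int) (i : Nat) (val : Int) : Nat :=
  ((nums.drop i).takeWhile (fun x => x < val)).length

lemma getD_set_self (l : List Int) (i : Nat) (hi : i < l.length) (x : Int) :
    (l.set i x).getD i 0 = x := by
  simp [List.getD_eq_getElem?_getD, hi]

lemma getD_set_ne (l : List Int) (i k : Nat) (h : k ≠ i) (x : Int) :
    (l.set i x).getD k 0 = l.getD k 0 := by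
  simp [List.getD_eq_getElem?_getD, List.getElem?_set_ne (by omega : i ≠ k)]

lemma lenL_le (nums : List Int) (i : Nat) (val : Int) : lenL nums i val ≤ i := by
  have h := (List.takeWhile_prefix (p := fun x => decide (x < val))
    (l := (nums.take i).reverse)).length_le
  simp at h
  unfold lenL
  omega

lemma take_succ_getD (nums : List Int) (i : Nat) (hi : i < nums.length) :
    nums.take (i + 1) = nums.take i ++ [nums.getD i 0] := by
  rw [List.take_add_one, List.getElem?_eq_getElem hi]
  rw [List.getD_eq_getElem _ _ hi]
  rfl

lemma drop_cons_getD (nums : List Int) (i : Nat) (hi : i < nums.length) :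
    nums.drop i = nums.getD i 0 :: nums.drop (i + 1) := by
  rw [List.drop_eq_getElem_cons hi, List.getD_eq_getElem _ _ hi]

lemma cntR_eq (val : Int) (l : List Int) :
    cntR val l = ((l.takeWhile (fun x => x < val)).length : Int) := by
  induction l with
  | nil => simp [cntR]
  | cons x rest ih =>
    by_cases h : x < val <;> simp [cntR, h, ih]

lemma cntL_eq (nums : List Int) (val : Int) :
    ∀ i, i ≤ nums.length → cntL nums val i = (lenL nums i val : Int) := by
  intro i
  induction i with
  | zero => intro _; simp [cntL, lenL]
  | succ j ih =>
    intro hji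
    have hj : j < nums.length := by omega
    have htake := take_succ_getD nums j hj
    have hih := ih (by omega : j ≤ nums.length)
    by_cases h : nums.getD j 0 < val
    all_goals rw [List.getD_eq_getElem?_getD] at h
    · simp [cntL, lenL, htake, h, hih]
    · simp [cntL, lenL, htake, h]

lemma lenL_succ_lt (nums : List Int) (i : Nat) (hi : i < nums.length) (val : Int)
    (h : nums.getD i 0 < val) : lenL nums (i + 1) val = lenL nums i val + 1 := by
  rw [List.getD_eq_getElem?_getD] at h
  simp [lenL, take_succ_getD nums i hi, h]

lemma lenL_succ_ge (nums : List Int) (i : Nat) (hi : i < nums.length) (val : Int)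
    (h : ¬ nums.getD i 0 < val) : lenL nums (i + 1) val = 0 := by
  rw [List.getD_eq_getElem?_getD] at h
  simp [lenL, take_succ_getD nums i hi, h]

lemma lenR_cons_lt (nums : List Int) (i : Nat) (hi : i < nums.length) (val : Int)
    (h : nums.getD i 0 < val) : lenR nums i val = lenR nums (i + 1) val + 1 := by
  rw [List.getD_eq_getElem?_getD] at h
  simp [lenR, drop_cons_getD nums i hi, h]

lemma lenR_cons_ge (nums : List Int) (i : Nat) (hi : i < nums.length) (val : Int)
    (h : ¬ nums.getD i 0 < val) : lenR nums i val = 0 := by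
  rw [List.getD_eq_getElem?_getD] at h
  simp [lenR, drop_cons_getD nums i hi, h]

-- dropping small elements twice collapses when the first threshold is ≤ the second
lemma popS_popS (u v : Int) (h : u ≤ v) (s : List (Int × Nat)) :
    popS v (popS u s) = popS v s := by
  induction s with
  | nil => rfl
  | cons p rest ih =>
    obtain ⟨w, j⟩ := p
    by_cases hw : w < u
    · have : w < v := lt_of_lt_of_le hw h
      simp [popS, hw, this, ih]
    · simp [popS, hw]

-- stack invariant of the left pass, after processing indices < i
def QL (nums : List Int) (i : Nat) (s : List (Int × Nat)) : Prop :=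
  ∀ val : Int,
    (∀ v j, (popS val s).head? = some (v, j) → j < i ∧ lenL nums i val = i - j - 1) ∧
    ((popS val s).head? = none → lenL nums i val = i)

-- stack invariant of the right pass, before processing index i-1 (suffix from i processed)
def QR (nums : List Int) (i : Nat) (s : List (Int × Nat)) : Prop :=
  ∀ val : Int,
    (∀ v j, (popS val s).head? = some (v, j) → i ≤ j ∧ j < nums.length ∧ lenR nums i val = j - i) ∧
    ((popS val s).head? = none → lenR nums i val = nums.length - i)

lemma QL_zero (nums : List Int) : QL nums 0 [] := by
  intro val
  constructor
  · intro v j h; simp [popS] at h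
  · intro _; simp [lenL]

lemma QR_init (nums : List Int) : QR nums nums.length [] := by
  intro val
  constructor
  · intro v j h; simp [popS] at h
  · intro _; simp [lenR]

lemma QL_step (nums : List Int) (i : Nat) (hi : i < nums.length) (s : List (Int × Nat))
    (hq : QL nums i s) : QL nums (i + 1) ((nums.getD i 0, i) :: popS (nums.getD i 0) s) := by
  intro val
  by_cases hv : nums.getD i 0 < val
  · have hcol : popS val ((nums.getD i 0, i) :: popS (nums.getD i 0) s) = popS val s := by
      simp only [popS, if_pos hv]
      exact popS_popS _ _ (le_of_lt hv) s
    constructor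
    · intro v j h
      rw [hcol] at h
      obtain ⟨hj, hlen⟩ := (hq val).1 v j h
      have hb := lenL_le nums i val
      refine ⟨by omega, ?_⟩
      rw [lenL_succ_lt nums i hi val hv]
      omega
    · intro h
      rw [hcol] at h
      have := (hq val).2 h
      rw [lenL_succ_lt nums i hi val hv]
      omega
  · have hcol : popS val ((nums.getD i 0, i) :: popS (nums.getD i 0) s)
        = (nums.getD i 0, i) :: popS (nums.getD i 0) s := by
      simp only [popS, if_neg hv]
    constructor
    · intro v j h
      rw [hcol] at h
      simp only [List.head?_cons, Option.some.injEq, Prod.mk.injEq] at h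
      obtain ⟨_, hj⟩ := h
      subst hj
      refine ⟨by omega, ?_⟩
      rw [lenL_succ_ge nums i hi val hv]
      omega
    · intro h
      rw [hcol] at h
      simp at h

lemma QR_step (nums : List Int) (i : Nat) (hi : i < nums.length) (s : List (Int × Nat))
    (hq : QR nums (i + 1) s) : QR nums i ((nums.getD i 0, i) :: popS (nums.getD i 0) s) := by
  intro val
  by_cases hv : nums.getD i 0 < val
  · have hcol : popS val ((nums.getD i 0, i) :: popS (nums.getD i 0) s) = popS val s := by
      simp only [popS, if_pos hv]
      exact popS_popS _ _ (le_of_lt hv) s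
    constructor
    · intro v j h
      rw [hcol] at h
      obtain ⟨hij, hj, hlen⟩ := (hq val).1 v j h
      refine ⟨by omega, hj, ?_⟩
      rw [lenR_cons_lt nums i hi val hv]
      omega
    · intro h
      rw [hcol] at h
      have := (hq val).2 h
      rw [lenR_cons_lt nums i hi val hv]
      omega
  · have hcol : popS val ((nums.getD i 0, i) :: popS (nums.getD i 0) s)
        = (nums.getD i 0, i) :: popS (nums.getD i 0) s := by
      simp only [popS, if_neg hv]
    constructor
    · intro v j h
      rw [hcol] at h
      simp only [List.head?_cons, Option.some.injEq, Prod.mk.injEq] at h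
      obtain ⟨_, hj⟩ := h
      subst hj
      refine ⟨le_refl _, hi, ?_⟩
      rw [lenR_cons_ge nums i hi val hv]
      omega
    · intro h
      rw [hcol] at h
      simp at h

-- what the left pass does to res, pointwise
lemma lpass_spec (nums : List Int) :
    ∀ rem i s res, rem = nums.drop i → QL nums i s → res.length = nums.length →
      (lpass i rem s res).length = res.length ∧
      ∀ k, k < nums.length →
        (lpass i rem s res).getD k 0 =
          if k < i then res.getD k 0
          else res.getD k 0 + (lenL nums k (nums.getD k 0) : Int) := by
  intro rem
  induction rem with
  | nil =>
    intro i s res hrem _ _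
    have hi : nums.length ≤ i := by
      have := congrArg List.length hrem
      simp at this
      omega
    simp only [lpass]
    exact ⟨trivial, fun k hk => by rw [if_pos (by omega : k < i)]⟩
  | cons val rest ih =>
    intro i s res hrem hq hlen
    have hi : i < nums.length := by
      by_contra hc
      rw [List.drop_eq_nil_of_le (by omega)] at hrem
      simp at hrem
    rw [drop_cons_getD nums i hi] at hrem
    obtain ⟨hval, hrest⟩ := List.cons_eq_cons.mp hrem.symm
    subst hval
    -- the amount added at index i equals the left takeWhile length
    have hadd : (match (popS (nums.getD i 0) s).head? with
        | some (_, j) => (i : Int) - (j : Int) - 1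
        | none => (i : Int)) = (lenL nums i (nums.getD i 0) : Int) := by
      cases hh : (popS (nums.getD i 0) s).head? with
      | none =>
        have h2 := (hq (nums.getD i 0)).2 hh
        show (i : Int) = (lenL nums i (nums.getD i 0) : Int)
        omega
      | some p =>
        obtain ⟨v, j⟩ := p
        obtain ⟨hj, hlen'⟩ := (hq (nums.getD i 0)).1 v j hh
        show (i : Int) - (j : Int) - 1 = (lenL nums i (nums.getD i 0) : Int)
        omega
    have hset : (res.set i (res.getD i 0 + (match (popS (nums.getD i 0) s).head? with
        | some (_, j) => (i : Int) - (j : Int) - 1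
        | none => (i : Int)))).length = nums.length := by simp [hlen]
    have hih := ih (i + 1) ((nums.getD i 0, i) :: popS (nums.getD i 0) s) _ hrest.symm
      (QL_step nums i hi s hq) hset
    simp only [lpass]
    refine ⟨by rw [hih.1]; simp [hlen], ?_⟩
    intro k hk
    rw [hih.2 k hk]
    by_cases hki : k = i
    · subst hki
      rw [if_pos (Nat.lt_succ_self k), if_neg (lt_irrefl k), getD_set_self res k (by omega) _,
        hadd]
    · by_cases hlt : k < i
      · rw [if_pos (by omega : k < i + 1), if_pos hlt, getD_set_ne res i k hki _]
      · rw [if_neg (by omega : ¬ k < i + 1), if_neg hlt, getD_set_ne res i k hki _]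

-- what the right pass does to res, pointwise
lemma rpass_spec (nums : List Int) :
    ∀ i s res, i ≤ nums.length → QR nums i s → res.length = nums.length →
      (rpass nums nums.length i s res).length = res.length ∧
      ∀ k, k < nums.length →
        (rpass nums nums.length i s res).getD k 0 =
          if k < i then res.getD k 0 + (lenR nums (k + 1) (nums.getD k 0) : Int)
          else res.getD k 0 := by
  intro i
  induction i with
  | zero =>
    intro s res _ _ _
    simp only [rpass]
    exact ⟨trivial, fun k hk => by rw [if_neg (by omega : ¬ k < 0)]⟩
  | succ i ih =>
    intro s res hin hq hlen
    have hi : i < nums.length := by omega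
    have hadd : (match (popS (nums.getD i 0) s).head? with
        | some (_, j) => (j : Int) - (i : Int) - 1
        | none => (nums.length : Int) - (i : Int) - 1)
        = (lenR nums (i + 1) (nums.getD i 0) : Int) := by
      cases hh : (popS (nums.getD i 0) s).head? with
      | none =>
        have h2 := (hq (nums.getD i 0)).2 hh
        show (nums.length : Int) - (i : Int) - 1 = (lenR nums (i + 1) (nums.getD i 0) : Int)
        omega
      | some p =>
        obtain ⟨v, j⟩ := p
        obtain ⟨hij, hj, hlen'⟩ := (hq (nums.getD i 0)).1 v j hh
        show (j : Int) - (i : Int) - 1 = (lenR nums (i + 1) (nums.getD i 0) : Int)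
        omega
    have hset : (res.set i (res.getD i 0 + (match (popS (nums.getD i 0) s).head? with
        | some (_, j) => (j : Int) - (i : Int) - 1
        | none => (nums.length : Int) - (i : Int) - 1))).length = nums.length := by simp [hlen]
    have hih := ih ((nums.getD i 0, i) :: popS (nums.getD i 0) s) _ (by omega)
      (QR_step nums i hi s hq) hset
    simp only [rpass]
    refine ⟨by rw [hih.1]; simp [hlen], ?_⟩
    intro k hk
    rw [hih.2 k hk]
    by_cases hki : k = i
    · subst hki
      rw [if_neg (lt_irrefl k), if_pos (Nat.lt_succ_self k), getD_set_self res k (by omega) _,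
        hadd]
    · by_cases hlt : k < i
      · rw [if_pos hlt, if_pos (by omega : k < i + 1), getD_set_ne res i k hki _]
      · rw [if_neg hlt, if_neg (by omega : ¬ k < i + 1), getD_set_ne res i k hki _]

-- ===== VERDICT (by name: the statement is the Claim_ definition above) =====
theorem maximumLengthOfRanges_spec : Claim_equal_maximumLengthOfRanges := by
  intro nums _
  show rpass nums nums.length nums.length [] (lpass 0 nums [] (List.replicate nums.length (1 : Int)))
      = maximumLengthOfRanges_alt nums
  have hrep : (List.replicate nums.length (1 : Int)).length = nums.length := by simp
  have hl := lpass_spec nums nums 0 [] (List.replicate nums.length (1 : Int))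
    (by simp) (QL_zero nums) hrep
  have hr := rpass_spec nums nums.length [] (lpass 0 nums [] (List.replicate nums.length (1 : Int)))
    (le_refl _) (QR_init nums) (by rw [hl.1]; exact hrep)
  have hlenA : (rpass nums nums.length nums.length [] (lpass 0 nums []
      (List.replicate nums.length (1 : Int)))).length = nums.length := by
    rw [hr.1, hl.1]; exact hrep
  apply List.ext_getElem
  · rw [hlenA]
    simp [maximumLengthOfRanges_alt]
  · intro k hk1 hk2
    have hkn : k < nums.length := by omega
    rw [← List.getD_eq_getElem _ 0 hk1]
    rw [hr.2 k hkn, if_pos hkn, hl.2 k hkn, if_neg (by omega)]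
    have hrep1 : (List.replicate nums.length (1 : Int)).getD k 0 = 1 := by
      rw [List.getD_eq_getElem _ 0 (by rw [hrep]; exact hkn)]
      simp
    rw [hrep1]
    have hB : (maximumLengthOfRanges_alt nums)[k]'hk2
        = 1 + cntL nums (nums.getD k 0) k + cntR (nums.getD k 0) (nums.drop (k + 1)) := by
      simp [maximumLengthOfRanges_alt]
    rw [hB, cntL_eq nums (nums.getD k 0) k (by omega), cntR_eq]
    rfl
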